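-- pv_equiv track=rewrite | github.com/MOX233/MEET_simulation | utils/plot_utils.py | max_ignore_None
-- ===== SOURCE A (Python) =====
-- def max_ignore_None(data_list):
--     data_list_ignore_None = []
--     for data in data_list:
--         if data != None:
--             data_list_ignore_None.append(data)
--     if len(data_list_ignore_None) == 0:
--         return None
--     else:
--         return max(data_list_ignore_None)
-- ===== SOURCE B (Python) =====
-- def max_ignore_None(data_list):
--     best = None
--     for data in data_list:
--         if data is not None:
--             if best is None or data > best:
--                 best = data
--     return best
-- ===== Notes on version B (the rewrite author's own statement) =====
-- stated objective: simpler
-- what changed: B fuses A's filter-then-max into a single pass keeping a running best (None until the first non-None element), so no intermediate list is built and max() is not called.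
import Mathlib
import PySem

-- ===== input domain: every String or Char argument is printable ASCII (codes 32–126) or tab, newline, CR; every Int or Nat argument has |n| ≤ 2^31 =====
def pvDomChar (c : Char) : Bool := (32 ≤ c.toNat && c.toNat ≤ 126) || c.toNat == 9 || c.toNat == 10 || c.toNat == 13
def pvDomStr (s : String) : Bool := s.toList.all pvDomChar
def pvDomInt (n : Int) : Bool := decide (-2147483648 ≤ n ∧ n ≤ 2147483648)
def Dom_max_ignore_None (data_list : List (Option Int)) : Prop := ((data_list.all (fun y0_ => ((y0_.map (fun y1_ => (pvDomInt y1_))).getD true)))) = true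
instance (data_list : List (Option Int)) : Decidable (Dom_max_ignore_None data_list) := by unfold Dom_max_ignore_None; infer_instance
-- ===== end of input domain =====

-- B fuses A's filter-then-max into a single running-best pass (simpler: no intermediate list, no max() call).


-- ===== PORT A =====
-- A: build the list of non-None elements, then return None if it is empty, else max of it.
def max_ignore_None (data_list : List (Option Int)) : Option Int :=
  let data_list_ignore_None :=
    data_list.foldl (fun acc data =>
      match data with
      | some v => acc ++ [v]
      | none => acc) []
  if data_list_ignore_None.length = 0 then none
  else PySem.List.max? data_list_ignore_None (fun y => y)

-- ===== PORT B =====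
-- B: one pass with a running best (none until the first non-None element).
def max_ignore_None_alt (data_list : List (Option Int)) : Option Int :=
  data_list.foldl (fun best data =>
    match data with
    | none => best
    | some v =>
      match best with
      | none => some v
      | some b => if v > b then some v else best) none

-- ===== PRECONDITION & SPEC =====
def Spec_max_ignore_None (data_list : List (Option Int)) (out : Option Int) : Prop := out = max_ignore_None_alt data_list
instance (data_list : List (Option Int)) (out : Option Int) : Decidable (Spec_max_ignore_None data_list out) := by unfold Spec_max_ignore_None; infer_instance

-- ===== CLAIM (what is proved, stated in full; the proofs are below) =====
def Claim_equal_max_ignore_None : Prop := ∀ (data_list : List (Option Int)), Dom_max_ignore_None data_list → Spec_max_ignore_None data_list (max_ignore_None data_list)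

-- ===== LEMMAS AND PROOFS =====

-- A's filtering loop builds acc ++ filterMap id
theorem pvA_filter (l : List (Option Int)) (acc : List Int) :
    l.foldl (fun acc data =>
      match data with
      | some v => acc ++ [v]
      | none => acc) acc = acc ++ l.filterMap id := by
  induction l generalizing acc with
  | nil => simp
  | cons h t ih =>
    cases h with
    | none => simp [List.foldl, ih]
    | some v => simp [List.foldl, ih]

-- B's loop is a running max over the non-None elements
theorem pvB_fold (l : List (Option Int)) (b : Option Int) :
    l.foldl (fun best data =>
      match data with
      | none => best
      | some v =>
        match best with
        | none => some v
        | some b => if v > b then some v else best) b =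
    match b with
    | none =>
      match l.filterMap id with
      | [] => none
      | x :: t => some (t.foldl max x)
    | some b0 => some ((l.filterMap id).foldl max b0) := by
  induction l generalizing b with
  | nil => cases b <;> simp
  | cons h t ih =>
    cases h with
    | none => simpa using ih b
    | some v =>
      cases b with
      | none => simpa using ih (some v)
      | some b0 =>
        have hmax : (if v > b0 then some v else some b0) = some (max b0 v) := by
          by_cases h : v > b0 <;> simp [h, max_def] <;> omega
        simp only [List.foldl]
        rw [hmax, ih (some (max b0 v))]
        simp

-- ===== VERDICT (by name: the statement is the Claim_ definition above) =====
theorem max_ignore_None_spec : Claim_equal_max_ignore_None := by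
  intro l _
  unfold Spec_max_ignore_None max_ignore_None max_ignore_None_alt
  rw [pvA_filter, pvB_fold]
  simp only [List.nil_append]
  cases hf : l.filterMap id with
  | nil => simp
  | cons x t => simp [PySem.List.max?_id_cons]
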